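-- pv_equiv track=rewrite | github.com/PROxZIMA/Advent-of-Code | 2020/Day 11/day-11.py | occu_seat_alld
-- ===== SOURCE A (Python) =====
-- def occu_seat_alld(lis, r, c, para):
--     height, width = len(lis) - 1, len(lis[0]) - 1
--     surr = ''
--
--     for i in range(c + 1, width):
--         if lis[r][i] != '.':
--             surr += lis[r][i]
--             break
--
--     for i, j in zip(range(r + 1, height), range(c + 1, width)):
--         if lis[i][j] != '.':
--             surr += lis[i][j]
--             break
--
--     for i in range(r + 1, height):
--         if lis[i][c] != '.':
--             surr += lis[i][c]
--             break
--
--     for i, j in zip(range(r + 1, height), range(c - 1, 0, -1)):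
--         if lis[i][j] != '.':
--             surr += lis[i][j]
--             break
--
--     for i in range(c - 1, 0, -1):
--         if lis[r][i] != '.':
--             surr += lis[r][i]
--             break
--
--     for i, j in zip(range(r - 1, 0, -1), range(c - 1, 0, -1)):
--         if lis[i][j] != '.':
--             surr += lis[i][j]
--             break
--
--     for i in range(r - 1, 0, -1):
--         if lis[i][c] != '.':
--             surr += lis[i][c]
--             break
--
--     for i, j in zip(range(r - 1, 0, -1), range(c + 1, width)):
--         if lis[i][j] != '.':
--             surr += lis[i][j]
--             break
--
--     if para == 'no':
--         return '#' not in surr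
--     else:
--         return surr.count('#') >= 5
-- ===== SOURCE B (Python) =====
-- def occu_seat_alld(lis, r, c, para):
--     height, width = len(lis) - 1, len(lis[0]) - 1
--     active = [(-1, -1), (-1, 0), (-1, 1), (0, -1), (0, 1), (1, -1), (1, 0), (1, 1)]
--     surr = []
--     k = 1
--     while active:
--         nxt = []
--         for dr, dc in active:
--             i, j = r + k * dr, c + k * dc
--             if (dr == 0 or (i < height if dr > 0 else i > 0)) and \
--                (dc == 0 or (j < width if dc > 0 else j > 0)):
--                 ch = lis[i][j]
--                 if ch != '.':
--                     surr.append(ch)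
--                 else:
--                     nxt.append((dr, dc))
--         active = nxt
--         k += 1
--     if para == 'no':
--         return '#' not in surr
--     else:
--         return surr.count('#') >= 5
-- ===== Notes on version B (the rewrite author's own statement) =====
-- stated objective: alternative
-- what changed: A casts eight independent direction-major rays (eight unrolled loops, zip'd ranges for the diagonals); B runs one distance-major sweep: a frontier holding the 8 directions expands ring by ring, each round checking every still-active direction's cell at the current distance and retiring a direction at its first seat or band exit, then applies the same para test.
import Mathlib
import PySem

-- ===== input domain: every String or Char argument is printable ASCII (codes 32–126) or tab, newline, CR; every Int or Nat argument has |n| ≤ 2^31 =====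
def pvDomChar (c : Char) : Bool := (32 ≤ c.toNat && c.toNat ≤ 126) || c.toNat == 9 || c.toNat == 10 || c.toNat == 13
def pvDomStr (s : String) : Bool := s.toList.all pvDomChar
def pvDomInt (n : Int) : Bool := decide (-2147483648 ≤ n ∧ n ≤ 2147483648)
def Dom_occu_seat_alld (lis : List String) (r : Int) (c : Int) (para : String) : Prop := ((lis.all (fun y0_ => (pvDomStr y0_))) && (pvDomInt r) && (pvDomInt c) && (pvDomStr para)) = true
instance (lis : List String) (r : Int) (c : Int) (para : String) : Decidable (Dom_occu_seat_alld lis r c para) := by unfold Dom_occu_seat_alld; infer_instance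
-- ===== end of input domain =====

-- B replaces A's eight independent direction-major ray scans by a single distance-major sweep:
-- a frontier of the 8 directions expands ring by ring, retiring each direction at its first seat
-- or band exit; same result on every input on which A returns.

-- ===== PORT A =====
-- lis[i][j] (Python indexing, negative wrap); the '.' default is never reached on inputs of Pre_
def pvCell (lis : List String) (i j : Int) : Char :=
  PySem.List.pyGetD (PySem.List.pyGetD lis i "").toList j '.'

-- "for i in <is>: if lis[r][i] != '.': surr += lis[r][i]; break" (horizontal rays)
def pvScanRow (lis : List String) (r : Int) : List Int → Option Char
  | [] => none
  | i :: rest => if pvCell lis r i ≠ '.' then some (pvCell lis r i) else pvScanRow lis r rest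

-- vertical rays: "for i in <is>: if lis[i][c] != '.': …; break"
def pvScanCol (lis : List String) (c : Int) : List Int → Option Char
  | [] => none
  | i :: rest => if pvCell lis i c ≠ '.' then some (pvCell lis i c) else pvScanCol lis c rest

-- diagonal rays: "for i, j in zip(…, …): if lis[i][j] != '.': …; break"
def pvScanDiag (lis : List String) : List (Int × Int) → Option Char
  | [] => none
  | (i, j) :: rest => if pvCell lis i j ≠ '.' then some (pvCell lis i j) else pvScanDiag lis rest

def occu_seat_alld (lis : List String) (r : Int) (c : Int) (para : String) : Bool :=
  let height : Int := (lis.length : Int) - 1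
  let width : Int := PySem.Str.len (PySem.List.pyGetD lis 0 "") - 1
  let surr : List Char := List.filterMap id
    [ pvScanRow lis r (PySem.List.pyRange (c + 1) width 1)
    , pvScanDiag lis ((PySem.List.pyRange (r + 1) height 1).zip (PySem.List.pyRange (c + 1) width 1))
    , pvScanCol lis c (PySem.List.pyRange (r + 1) height 1)
    , pvScanDiag lis ((PySem.List.pyRange (r + 1) height 1).zip (PySem.List.pyRange (c - 1) 0 (-1)))
    , pvScanRow lis r (PySem.List.pyRange (c - 1) 0 (-1))
    , pvScanDiag lis ((PySem.List.pyRange (r - 1) 0 (-1)).zip (PySem.List.pyRange (c - 1) 0 (-1)))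
    , pvScanCol lis c (PySem.List.pyRange (r - 1) 0 (-1))
    , pvScanDiag lis ((PySem.List.pyRange (r - 1) 0 (-1)).zip (PySem.List.pyRange (c + 1) width 1)) ]
  if para = "no" then !(surr.contains '#') else decide (5 ≤ surr.count '#')

-- ===== PORT B =====
-- one ring of Source B's sweep: for each still-active direction check the cell at the current
-- distance k; returns (the seats found this round, the surviving directions)
def pvRound (lis : List String) (h w r c k : Int) : List (Int × Int) → List Char × List (Int × Int)
  | [] => ([], [])
  | d :: rest =>
    let rec' := pvRound lis h w r c k rest
    let i := r + k * d.1
    let j := c + k * d.2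
    if (d.1 = 0 ∨ (if 0 < d.1 then i < h else 0 < i)) ∧
       (d.2 = 0 ∨ (if 0 < d.2 then j < w else 0 < j)) then
      if pvCell lis i j ≠ '.' then (pvCell lis i j :: rec'.1, rec'.2)
      else (rec'.1, d :: rec'.2)
    else rec'

-- "while active: …; k += 1"; the fuel argument only makes the loop total in Lean (the call
-- site passes fuel that suffices on every input of Pre_)
def pvRing (lis : List String) (h w r c : Int) : Int → List (Int × Int) → Nat → List Char
  | _, _, 0 => []
  | k, active, fuel + 1 =>
    if active = [] then []
    else
      let st := pvRound lis h w r c k active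
      st.1 ++ pvRing lis h w r c (k + 1) st.2 fuel

def occu_seat_alld_alt (lis : List String) (r : Int) (c : Int) (para : String) : Bool :=
  let height : Int := (lis.length : Int) - 1
  let width : Int := PySem.Str.len (PySem.List.pyGetD lis 0 "") - 1
  let fuel : Nat := 2 * lis.length + 2 * (lis.map (fun s => s.toList.length)).sum + 2
  let active : List (Int × Int) := [(-1, -1), (-1, 0), (-1, 1), (0, -1), (0, 1), (1, -1), (1, 0), (1, 1)]
  let surr : List Char := pvRing lis height width r c 1 active fuel
  if para = "no" then !(surr.contains '#') else decide (5 ≤ surr.count '#')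

-- ===== PRECONDITION & SPEC =====
-- pvRlen lis i = len(lis[i]) (Python indexing); pvOk lis i j = "lis[i][j] exists (wrap allowed)"
def pvRlen (lis : List String) (i : Int) : Int := ((PySem.List.pyGetD lis i "").toList.length : Int)
def pvN (lis : List String) : Nat := 2 * lis.length + 2 * (lis.map (fun s => s.toList.length)).sum + 2

-- "this ray raises no IndexError": for every step p of the ray, if every earlier cell exists and
-- is floor '.', then the cell at step p exists too. The 'p < pvN lis' clamp only bounds the
-- quantifier and is exact: a ray's first pvN cells cannot all exist (their coordinates move by 1
-- each step and in-range coordinates are fewer than pvN), so for p ≥ pvN the premise is false.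
def pvOkB (lis : List String) (i j : Int) : Bool :=
  decide ((-(lis.length : Int) ≤ i ∧ i < (lis.length : Int)) ∧ -(pvRlen lis i) ≤ j ∧ j < pvRlen lis i)

def pvRayOk (lis : List String) (r0 c0 dr dc steps : Int) : Bool :=
  (List.range (pvN lis)).all fun p =>
    !(decide ((p : Int) < steps)) ||
    !((List.range p).all fun q =>
        pvOkB lis (r0 + q * dr) (c0 + q * dc) && (pvCell lis (r0 + q * dr) (c0 + q * dc) == '.')) ||
    pvOkB lis (r0 + p * dr) (c0 + p * dc)

-- Pre_ = exactly the inputs on which A returns (raises no IndexError): the grid is nonempty and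
-- each of the eight ray scans reaches only existing cells before its first seat.
def Pre_occu_seat_alld (lis : List String) (r : Int) (c : Int) (para : String) : Prop :=
  lis ≠ [] ∧
  pvRayOk lis r (c + 1) 0 1 (pvRlen lis 0 - 1 - (c + 1)) = true ∧
  pvRayOk lis (r + 1) (c + 1) 1 1 (min ((lis.length : Int) - 1 - (r + 1)) (pvRlen lis 0 - 1 - (c + 1))) = true ∧
  pvRayOk lis (r + 1) c 1 0 ((lis.length : Int) - 1 - (r + 1)) = true ∧
  pvRayOk lis (r + 1) (c - 1) 1 (-1) (min ((lis.length : Int) - 1 - (r + 1)) (c - 1)) = true ∧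
  pvRayOk lis r (c - 1) 0 (-1) (c - 1) = true ∧
  pvRayOk lis (r - 1) (c - 1) (-1) (-1) (min (r - 1) (c - 1)) = true ∧
  pvRayOk lis (r - 1) c (-1) 0 (r - 1) = true ∧
  pvRayOk lis (r - 1) (c + 1) (-1) 1 (min (r - 1) (pvRlen lis 0 - 1 - (c + 1))) = true
instance (lis : List String) (r : Int) (c : Int) (para : String) : Decidable (Pre_occu_seat_alld lis r c para) := by
  unfold Pre_occu_seat_alld; infer_instance

def pvWitness_occu_seat_alld : List String × Int × Int × String := (["#.L", ".#.", "L.#"], 1, 1, "no")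

def Spec_occu_seat_alld (lis : List String) (r : Int) (c : Int) (para : String) (out : Bool) : Prop := out = occu_seat_alld_alt lis r c para
instance (lis : List String) (r : Int) (c : Int) (para : String) (out : Bool) : Decidable (Spec_occu_seat_alld lis r c para out) := by unfold Spec_occu_seat_alld; infer_instance

-- ===== CLAIM (what is proved, stated in full; the proofs are below) =====
def Claim_equal_occu_seat_alld : Prop := ∀ (lis : List String) (r : Int) (c : Int) (para : String), Dom_occu_seat_alld lis r c para → Pre_occu_seat_alld lis r c para → Spec_occu_seat_alld lis r c para (occu_seat_alld lis r c para)

-- ===== LEMMAS AND PROOFS =====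

-- "lis[i][j] exists (Python wrap allowed)" — the Prop form of pvOkB, used by the proofs
def pvOk (lis : List String) (i j : Int) : Prop :=
  (-(lis.length : Int) ≤ i ∧ i < (lis.length : Int)) ∧ -(pvRlen lis i) ≤ j ∧ j < pvRlen lis i

-- B's walk along one direction, indexed by the distance k (proof-only helper)
def pvWalkAt (lis : List String) (h w r c dr dc : Int) : Int → Nat → Option Char
  | _, 0 => none
  | k, fuel + 1 =>
    if (dr = 0 ∨ (if 0 < dr then r + k * dr < h else 0 < r + k * dr)) ∧
       (dc = 0 ∨ (if 0 < dc then c + k * dc < w else 0 < c + k * dc)) then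
      if pvCell lis (r + k * dr) (c + k * dc) ≠ '.' then some (pvCell lis (r + k * dr) (c + k * dc))
      else pvWalkAt lis h w r c dr dc (k + 1) fuel
    else none

-- the coordinate form of the same walk, used to connect to A's scans
def pvWalk (lis : List String) (height width dr dc rr cc : Int) : Nat → Option Char
  | 0 => none
  | fuel + 1 =>
    if (dr = 0 ∨ (if 0 < dr then rr < height else 0 < rr)) ∧
       (dc = 0 ∨ (if 0 < dc then cc < width else 0 < cc)) then
      if pvCell lis rr cc ≠ '.' then some (pvCell lis rr cc)
      else pvWalk lis height width dr dc (rr + dr) (cc + dc) fuel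
    else none

lemma walkAt_eq_walk (lis : List String) (h w r c dr dc : Int) :
    ∀ (fuel : Nat) (k : Int), pvWalkAt lis h w r c dr dc k fuel = pvWalk lis h w dr dc (r + k * dr) (c + k * dc) fuel := by
  intro fuel
  induction fuel with
  | zero => intro k; rfl
  | succ n ih =>
    intro k
    simp only [pvWalkAt, pvWalk]
    have h1 : r + (k + 1) * dr = r + k * dr + dr := by ring
    have h2 : c + (k + 1) * dc = c + k * dc + dc := by ring
    rw [ih (k + 1), h1, h2]

-- east: the walk with (dr,dc) = (0,1) and enough fuel is A's scan of range(cc, w)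
lemma walk_E (lis : List String) (h w r : Int) :
    ∀ (fuel : Nat) (cc : Int), (w - cc).toNat ≤ fuel →
      pvWalk lis h w 0 1 r cc fuel = pvScanRow lis r (PySem.List.pyRange cc w 1) := by
  intro fuel
  induction fuel with
  | zero =>
    intro cc hb
    rw [PySem.List.pyRange_one_eq_nil (by omega)]
    simp [pvWalk, pvScanRow]
  | succ n ih =>
    intro cc hb
    by_cases hc : cc < w
    · rw [PySem.List.pyRange_one_cons hc]
      simp only [pvWalk]
      rw [if_pos ⟨Or.inl trivial, Or.inr (by simpa using hc)⟩]
      simp only [pvScanRow]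
      split_ifs with hch
      · rfl
      · simpa [sub_eq_add_neg] using ih (cc + 1) (by omega)
    · rw [PySem.List.pyRange_one_eq_nil (by omega)]
      simp only [pvWalk, pvScanRow]
      rw [if_neg (by simp; omega)]

lemma walk_W (lis : List String) (h w r : Int) :
    ∀ (fuel : Nat) (cc : Int), cc.toNat ≤ fuel →
      pvWalk lis h w 0 (-1) r cc fuel = pvScanRow lis r (PySem.List.pyRange cc 0 (-1)) := by
  intro fuel
  induction fuel with
  | zero =>
    intro cc hb
    rw [PySem.List.pyRange_neg_one_eq_nil (by omega)]
    simp [pvWalk, pvScanRow]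
  | succ n ih =>
    intro cc hb
    by_cases hc : 0 < cc
    · rw [PySem.List.pyRange_neg_one_cons hc]
      simp only [pvWalk]
      rw [if_pos ⟨Or.inl trivial, Or.inr (by simpa using hc)⟩]
      simp only [pvScanRow]
      split_ifs with hch
      · rfl
      · simpa [sub_eq_add_neg] using ih (cc + -1) (by omega)
    · rw [PySem.List.pyRange_neg_one_eq_nil (by omega)]
      simp only [pvWalk, pvScanRow]
      rw [if_neg (by simp; omega)]

lemma walk_S (lis : List String) (h w c : Int) :
    ∀ (fuel : Nat) (rr : Int), (h - rr).toNat ≤ fuel →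
      pvWalk lis h w 1 0 rr c fuel = pvScanCol lis c (PySem.List.pyRange rr h 1) := by
  intro fuel
  induction fuel with
  | zero =>
    intro rr hb
    rw [PySem.List.pyRange_one_eq_nil (by omega)]
    simp [pvWalk, pvScanCol]
  | succ n ih =>
    intro rr hb
    by_cases hr : rr < h
    · rw [PySem.List.pyRange_one_cons hr]
      simp only [pvWalk]
      rw [if_pos ⟨Or.inr (by simpa using hr), Or.inl trivial⟩]
      simp only [pvScanCol]
      split_ifs with hch
      · rfl
      · simpa [sub_eq_add_neg] using ih (rr + 1) (by omega)
    · rw [PySem.List.pyRange_one_eq_nil (by omega)]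
      simp only [pvWalk, pvScanCol]
      rw [if_neg (by simp; omega)]

lemma walk_N (lis : List String) (h w c : Int) :
    ∀ (fuel : Nat) (rr : Int), rr.toNat ≤ fuel →
      pvWalk lis h w (-1) 0 rr c fuel = pvScanCol lis c (PySem.List.pyRange rr 0 (-1)) := by
  intro fuel
  induction fuel with
  | zero =>
    intro rr hb
    rw [PySem.List.pyRange_neg_one_eq_nil (by omega)]
    simp [pvWalk, pvScanCol]
  | succ n ih =>
    intro rr hb
    by_cases hr : 0 < rr
    · rw [PySem.List.pyRange_neg_one_cons hr]
      simp only [pvWalk]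
      rw [if_pos ⟨Or.inr (by simpa using hr), Or.inl trivial⟩]
      simp only [pvScanCol]
      split_ifs with hch
      · rfl
      · simpa [sub_eq_add_neg] using ih (rr + -1) (by omega)
    · rw [PySem.List.pyRange_neg_one_eq_nil (by omega)]
      simp only [pvWalk, pvScanCol]
      rw [if_neg (by simp; omega)]

lemma walk_SE (lis : List String) (h w : Int) :
    ∀ (fuel : Nat) (rr cc : Int), min (h - rr).toNat (w - cc).toNat ≤ fuel →
      pvWalk lis h w 1 1 rr cc fuel =
        pvScanDiag lis ((PySem.List.pyRange rr h 1).zip (PySem.List.pyRange cc w 1)) := by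
  intro fuel
  induction fuel with
  | zero =>
    intro rr cc hb
    rcases (show h ≤ rr ∨ w ≤ cc by omega) with hle | hle
    · rw [PySem.List.pyRange_one_eq_nil hle]
      simp [pvWalk, pvScanDiag]
    · rw [PySem.List.pyRange_one_eq_nil (a := cc) (b := w) hle]
      simp [pvWalk, pvScanDiag]
  | succ n ih =>
    intro rr cc hb
    by_cases hr : rr < h
    · by_cases hc : cc < w
      · rw [PySem.List.pyRange_one_cons hr, PySem.List.pyRange_one_cons hc]
        simp only [pvWalk]
        rw [if_pos ⟨Or.inr (by simpa using hr), Or.inr (by simpa using hc)⟩]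
        simp only [List.zip_cons_cons, pvScanDiag]
        split_ifs with hch
        · rfl
        · exact ih (rr + 1) (cc + 1) (by omega)
      · rw [PySem.List.pyRange_one_eq_nil (show w ≤ cc by omega)]
        simp only [pvWalk, pvScanDiag, List.zip_nil_right]
        rw [if_neg (by simp; omega)]
    · rw [PySem.List.pyRange_one_eq_nil (show h ≤ rr by omega)]
      simp only [pvWalk, pvScanDiag, List.zip_nil_left]
      rw [if_neg (by simp; omega)]

lemma walk_SW (lis : List String) (h w : Int) :
    ∀ (fuel : Nat) (rr cc : Int), min (h - rr).toNat cc.toNat ≤ fuel →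
      pvWalk lis h w 1 (-1) rr cc fuel =
        pvScanDiag lis ((PySem.List.pyRange rr h 1).zip (PySem.List.pyRange cc 0 (-1))) := by
  intro fuel
  induction fuel with
  | zero =>
    intro rr cc hb
    rcases (show h ≤ rr ∨ cc ≤ 0 by omega) with hle | hle
    · rw [PySem.List.pyRange_one_eq_nil hle]
      simp [pvWalk, pvScanDiag]
    · rw [PySem.List.pyRange_neg_one_eq_nil hle]
      simp [pvWalk, pvScanDiag]
  | succ n ih =>
    intro rr cc hb
    by_cases hr : rr < h
    · by_cases hc : 0 < cc
      · rw [PySem.List.pyRange_one_cons hr, PySem.List.pyRange_neg_one_cons hc]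
        simp only [pvWalk]
        rw [if_pos ⟨Or.inr (by simpa using hr), Or.inr (by simpa using hc)⟩]
        simp only [List.zip_cons_cons, pvScanDiag]
        split_ifs with hch
        · rfl
        · exact ih (rr + 1) (cc + -1) (by omega)
      · rw [PySem.List.pyRange_neg_one_eq_nil (show cc ≤ 0 by omega)]
        simp only [pvWalk, pvScanDiag, List.zip_nil_right]
        rw [if_neg (by simp; omega)]
    · rw [PySem.List.pyRange_one_eq_nil (show h ≤ rr by omega)]
      simp only [pvWalk, pvScanDiag, List.zip_nil_left]
      rw [if_neg (by simp; omega)]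

lemma walk_NW (lis : List String) (h w : Int) :
    ∀ (fuel : Nat) (rr cc : Int), min rr.toNat cc.toNat ≤ fuel →
      pvWalk lis h w (-1) (-1) rr cc fuel =
        pvScanDiag lis ((PySem.List.pyRange rr 0 (-1)).zip (PySem.List.pyRange cc 0 (-1))) := by
  intro fuel
  induction fuel with
  | zero =>
    intro rr cc hb
    rcases (show rr ≤ 0 ∨ cc ≤ 0 by omega) with hle | hle
    · rw [PySem.List.pyRange_neg_one_eq_nil hle]
      simp [pvWalk, pvScanDiag]
    · rw [PySem.List.pyRange_neg_one_eq_nil (a := cc) hle]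
      simp [pvWalk, pvScanDiag]
  | succ n ih =>
    intro rr cc hb
    by_cases hr : 0 < rr
    · by_cases hc : 0 < cc
      · rw [PySem.List.pyRange_neg_one_cons hr, PySem.List.pyRange_neg_one_cons hc]
        simp only [pvWalk]
        rw [if_pos ⟨Or.inr (by simpa using hr), Or.inr (by simpa using hc)⟩]
        simp only [List.zip_cons_cons, pvScanDiag]
        split_ifs with hch
        · rfl
        · exact ih (rr + -1) (cc + -1) (by omega)
      · rw [PySem.List.pyRange_neg_one_eq_nil (show cc ≤ 0 by omega)]
        simp only [pvWalk, pvScanDiag, List.zip_nil_right]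
        rw [if_neg (by simp; omega)]
    · rw [PySem.List.pyRange_neg_one_eq_nil (show rr ≤ 0 by omega)]
      simp only [pvWalk, pvScanDiag, List.zip_nil_left]
      rw [if_neg (by simp; omega)]

lemma walk_NE (lis : List String) (h w : Int) :
    ∀ (fuel : Nat) (rr cc : Int), min rr.toNat (w - cc).toNat ≤ fuel →
      pvWalk lis h w (-1) 1 rr cc fuel =
        pvScanDiag lis ((PySem.List.pyRange rr 0 (-1)).zip (PySem.List.pyRange cc w 1)) := by
  intro fuel
  induction fuel with
  | zero =>
    intro rr cc hb
    rcases (show rr ≤ 0 ∨ w ≤ cc by omega) with hle | hle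
    · rw [PySem.List.pyRange_neg_one_eq_nil hle]
      simp [pvWalk, pvScanDiag]
    · rw [PySem.List.pyRange_one_eq_nil hle]
      simp [pvWalk, pvScanDiag]
  | succ n ih =>
    intro rr cc hb
    by_cases hr : 0 < rr
    · by_cases hc : cc < w
      · rw [PySem.List.pyRange_neg_one_cons hr, PySem.List.pyRange_one_cons hc]
        simp only [pvWalk]
        rw [if_pos ⟨Or.inr (by simpa using hr), Or.inr (by simpa using hc)⟩]
        simp only [List.zip_cons_cons, pvScanDiag]
        split_ifs with hch
        · rfl
        · exact ih (rr + -1) (cc + 1) (by omega)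
      · rw [PySem.List.pyRange_one_eq_nil (show w ≤ cc by omega)]
        simp only [pvWalk, pvScanDiag, List.zip_nil_right]
        rw [if_neg (by simp; omega)]
    · rw [PySem.List.pyRange_neg_one_eq_nil (show rr ≤ 0 by omega)]
      simp only [pvWalk, pvScanDiag, List.zip_nil_left]
      rw [if_neg (by simp; omega)]

-- one ring equals one step of every active direction's walk, up to permutation
lemma round_perm (lis : List String) (h w r c k : Int) (fuel : Nat) :
    ∀ active : List (Int × Int),
      (active.filterMap (fun d => pvWalkAt lis h w r c d.1 d.2 k (fuel + 1))).Perm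
        ((pvRound lis h w r c k active).1 ++
          (pvRound lis h w r c k active).2.filterMap (fun d => pvWalkAt lis h w r c d.1 d.2 (k + 1) fuel)) := by
  intro active
  induction active with
  | nil => simp [pvRound]
  | cons d rest ih =>
    simp only [pvRound, List.filterMap_cons]
    by_cases hband : (d.1 = 0 ∨ (if 0 < d.1 then r + k * d.1 < h else 0 < r + k * d.1)) ∧
        (d.2 = 0 ∨ (if 0 < d.2 then c + k * d.2 < w else 0 < c + k * d.2))
    · rw [if_pos hband]
      by_cases hch : pvCell lis (r + k * d.1) (c + k * d.2) ≠ '.'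
      · rw [if_pos hch]
        have hw : pvWalkAt lis h w r c d.1 d.2 k (fuel + 1) =
            some (pvCell lis (r + k * d.1) (c + k * d.2)) := by
          simp only [pvWalkAt]; rw [if_pos hband, if_pos hch]
        rw [hw]
        simpa using ih.cons (pvCell lis (r + k * d.1) (c + k * d.2))
      · rw [if_neg hch]
        have hw : pvWalkAt lis h w r c d.1 d.2 k (fuel + 1) =
            pvWalkAt lis h w r c d.1 d.2 (k + 1) fuel := by
          simp only [pvWalkAt]; rw [if_pos hband, if_neg hch]
        rw [hw]
        simp only [List.filterMap_cons]
        cases hval : pvWalkAt lis h w r c d.1 d.2 (k + 1) fuel with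
        | none => simpa [hval] using ih
        | some a =>
          refine ((ih.cons a).trans ?_)
          exact List.perm_middle.symm
    · rw [if_neg hband]
      have hw : pvWalkAt lis h w r c d.1 d.2 k (fuel + 1) = none := by
        simp only [pvWalkAt]; rw [if_neg hband]
      rw [hw]
      exact ih

-- the whole ring sweep is, up to permutation, the eight independent walks
lemma ring_perm (lis : List String) (h w r c : Int) :
    ∀ (fuel : Nat) (k : Int) (active : List (Int × Int)),
      (pvRing lis h w r c k active fuel).Perm
        (active.filterMap (fun d => pvWalkAt lis h w r c d.1 d.2 k fuel)) := by
  intro fuel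
  induction fuel with
  | zero =>
    intro k active
    simp [pvRing, pvWalkAt]
  | succ n ih =>
    intro k active
    simp only [pvRing]
    by_cases hemp : active = []
    · simp [hemp]
    · rw [if_neg hemp]
      refine ((round_perm lis h w r c k n active).trans ?_).symm
      exact ((ih (k + 1) (pvRound lis h w r c k active).2).symm.append_left _)

-- the first cell of a nonempty ray exists (p = 0 of pvRayOk)
lemma pvOkB_eq (lis : List String) (i j : Int) : pvOkB lis i j = true ↔ pvOk lis i j := by
  unfold pvOkB pvOk
  exact decide_eq_true_iff

lemma rayOk_zero (lis : List String) (r0 c0 dr dc steps : Int)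
    (h : pvRayOk lis r0 c0 dr dc steps = true) (hs : 0 < steps) : pvOk lis r0 c0 := by
  unfold pvRayOk at h
  rw [List.all_eq_true] at h
  have h0 := h 0 (List.mem_range.mpr (by unfold pvN; omega))
  have hs' : decide ((((0 : Nat) : Int)) < steps) = true := by
    rw [decide_eq_true_eq]; exact_mod_cast hs
  simp only [hs', List.range_zero, List.all_nil, Bool.not_true, Bool.false_or] at h0
  rw [pvOkB_eq] at h0
  simpa using h0

-- ===== VERDICT (by name: the statement is the Claim_ definition above) =====
theorem occu_seat_alld_spec : Claim_equal_occu_seat_alld := by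
  intro lis r c para _ hpre
  obtain ⟨hne, pE, pSE, pS, pSW, pW, pNW, pN, pNE⟩ := hpre
  have hlen : PySem.Str.len (PySem.List.pyGetD lis 0 "") = pvRlen lis 0 :=
    PySem.Str.len_eq _
  -- every row's length is at most the total of all row lengths
  have hrow : ∀ i : Int, -(lis.length : Int) ≤ i → i < (lis.length : Int) →
      pvRlen lis i ≤ ((((lis.map (fun s => s.toList.length)).sum : Nat)) : Int) := by
    intro i h1 h2
    have hmem : PySem.List.pyGetD lis i "" ∈ lis :=
      PySem.List.pyGetD_mem lis "" ⟨h1, h2⟩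
    have hle : (PySem.List.pyGetD lis i "").toList.length ≤
        ((lis.map (fun s => s.toList.length)).sum : Nat) :=
      List.single_le_sum (by simp) _ (List.mem_map_of_mem hmem)
    unfold pvRlen
    exact_mod_cast hle
  have hHpos : 0 < lis.length := List.length_pos_iff.mpr hne
  have h00 : 0 ≤ pvRlen lis 0 := by unfold pvRlen; exact Int.natCast_nonneg _
  have h0 : pvRlen lis 0 ≤ ((((lis.map (fun s => s.toList.length)).sum : Nat)) : Int) :=
    hrow 0 (by omega) (by exact_mod_cast hHpos)
  unfold Spec_occu_seat_alld
  simp only [occu_seat_alld, occu_seat_alld_alt, hlen]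
  set H : Int := (lis.length : Int) - 1 with hH
  set W : Int := pvRlen lis 0 - 1 with hW
  set T : Nat := (lis.map (fun s => s.toList.length)).sum with hT
  set F : Nat := 2 * lis.length + 2 * T + 2 with hF
  -- the eight fuel budgets, from the existence of each ray's first cell
  have bE : (W - (c + 1)).toNat ≤ F := by
    by_cases hc : c + 1 < W
    · obtain ⟨⟨hb1, hb2⟩, hb3, _⟩ := rayOk_zero lis r (c + 1) 0 1 _ pE (by omega)
      have := hrow r hb1 hb2
      omega
    · omega
  have bSE : min (H - (r + 1)).toNat (W - (c + 1)).toNat ≤ F := by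
    by_cases hd : r + 1 < H ∧ c + 1 < W
    · obtain ⟨⟨hb1, _⟩, _⟩ := rayOk_zero lis (r + 1) (c + 1) 1 1 _ pSE (by omega)
      omega
    · omega
  have bS : (H - (r + 1)).toNat ≤ F := by
    by_cases hd : r + 1 < H
    · obtain ⟨⟨hb1, _⟩, _⟩ := rayOk_zero lis (r + 1) c 1 0 _ pS (by omega)
      omega
    · omega
  have bSW : min (H - (r + 1)).toNat (c - 1).toNat ≤ F := by
    by_cases hd : r + 1 < H ∧ 1 < c
    · obtain ⟨⟨hb1, _⟩, _⟩ := rayOk_zero lis (r + 1) (c - 1) 1 (-1) _ pSW (by omega)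
      omega
    · omega
  have bW : (c - 1).toNat ≤ F := by
    by_cases hc : 1 < c
    · obtain ⟨⟨hb1, hb2⟩, _, hb4⟩ := rayOk_zero lis r (c - 1) 0 (-1) _ pW (by omega)
      have := hrow r hb1 hb2
      omega
    · omega
  have bNW : min (r - 1).toNat (c - 1).toNat ≤ F := by
    by_cases hd : 1 < r ∧ 1 < c
    · obtain ⟨⟨_, hb2⟩, _⟩ := rayOk_zero lis (r - 1) (c - 1) (-1) (-1) _ pNW (by omega)
      omega
    · omega
  have bN : (r - 1).toNat ≤ F := by
    by_cases hd : 1 < r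
    · obtain ⟨⟨_, hb2⟩, _⟩ := rayOk_zero lis (r - 1) c (-1) 0 _ pN (by omega)
      omega
    · omega
  have bNE : min (r - 1).toNat (W - (c + 1)).toNat ≤ F := by
    by_cases hd : 1 < r ∧ c + 1 < W
    · obtain ⟨⟨_, hb2⟩, _⟩ := rayOk_zero lis (r - 1) (c + 1) (-1) 1 _ pNE (by omega)
      omega
    · omega
  -- the eight per-direction results of B's sweep are A's eight scans
  set g : Int × Int → Option Char :=
    fun d => pvWalkAt lis H W r c d.1 d.2 1 F with hg
  set dirsA : List (Int × Int) :=
    [(0, 1), (1, 1), (1, 0), (1, -1), (0, -1), (-1, -1), (-1, 0), (-1, 1)] with hdirsA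
  set dirsB : List (Int × Int) :=
    [(-1, -1), (-1, 0), (-1, 1), (0, -1), (0, 1), (1, -1), (1, 0), (1, 1)] with hdirsB
  have hmap : dirsA.map g =
      [ pvScanRow lis r (PySem.List.pyRange (c + 1) W 1)
      , pvScanDiag lis ((PySem.List.pyRange (r + 1) H 1).zip (PySem.List.pyRange (c + 1) W 1))
      , pvScanCol lis c (PySem.List.pyRange (r + 1) H 1)
      , pvScanDiag lis ((PySem.List.pyRange (r + 1) H 1).zip (PySem.List.pyRange (c - 1) 0 (-1)))
      , pvScanRow lis r (PySem.List.pyRange (c - 1) 0 (-1))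
      , pvScanDiag lis ((PySem.List.pyRange (r - 1) 0 (-1)).zip (PySem.List.pyRange (c - 1) 0 (-1)))
      , pvScanCol lis c (PySem.List.pyRange (r - 1) 0 (-1))
      , pvScanDiag lis ((PySem.List.pyRange (r - 1) 0 (-1)).zip (PySem.List.pyRange (c + 1) W 1)) ] := by
    rw [hdirsA, hg]
    simp only [List.map_cons, List.map_nil, walkAt_eq_walk]
    norm_num [← sub_eq_add_neg]
    rw [walk_E lis H W r F (c + 1) bE,
        walk_SE lis H W F (r + 1) (c + 1) bSE,
        walk_S lis H W c F (r + 1) bS,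
        walk_SW lis H W F (r + 1) (c - 1) bSW,
        walk_W lis H W r F (c - 1) bW,
        walk_NW lis H W F (r - 1) (c - 1) bNW,
        walk_N lis H W c F (r - 1) bN,
        walk_NE lis H W F (r - 1) (c + 1) bNE]
    exact ⟨rfl, rfl, rfl, rfl, rfl, rfl, rfl, rfl⟩
  have hA : List.filterMap id
      [ pvScanRow lis r (PySem.List.pyRange (c + 1) W 1)
      , pvScanDiag lis ((PySem.List.pyRange (r + 1) H 1).zip (PySem.List.pyRange (c + 1) W 1))
      , pvScanCol lis c (PySem.List.pyRange (r + 1) H 1)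
      , pvScanDiag lis ((PySem.List.pyRange (r + 1) H 1).zip (PySem.List.pyRange (c - 1) 0 (-1)))
      , pvScanRow lis r (PySem.List.pyRange (c - 1) 0 (-1))
      , pvScanDiag lis ((PySem.List.pyRange (r - 1) 0 (-1)).zip (PySem.List.pyRange (c - 1) 0 (-1)))
      , pvScanCol lis c (PySem.List.pyRange (r - 1) 0 (-1))
      , pvScanDiag lis ((PySem.List.pyRange (r - 1) 0 (-1)).zip (PySem.List.pyRange (c + 1) W 1)) ]
      = dirsA.filterMap g := by
    rw [← hmap, List.filterMap_map]
    simp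
  have hBperm : (pvRing lis H W r c 1 dirsB F).Perm (dirsB.filterMap g) :=
    ring_perm lis H W r c F 1 dirsB
  have hdperm : dirsA.Perm dirsB := by rw [hdirsA, hdirsB]; decide
  have hperm : (List.filterMap id
      [ pvScanRow lis r (PySem.List.pyRange (c + 1) W 1)
      , pvScanDiag lis ((PySem.List.pyRange (r + 1) H 1).zip (PySem.List.pyRange (c + 1) W 1))
      , pvScanCol lis c (PySem.List.pyRange (r + 1) H 1)
      , pvScanDiag lis ((PySem.List.pyRange (r + 1) H 1).zip (PySem.List.pyRange (c - 1) 0 (-1)))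
      , pvScanRow lis r (PySem.List.pyRange (c - 1) 0 (-1))
      , pvScanDiag lis ((PySem.List.pyRange (r - 1) 0 (-1)).zip (PySem.List.pyRange (c - 1) 0 (-1)))
      , pvScanCol lis c (PySem.List.pyRange (r - 1) 0 (-1))
      , pvScanDiag lis ((PySem.List.pyRange (r - 1) 0 (-1)).zip (PySem.List.pyRange (c + 1) W 1)) ]).Perm
      (pvRing lis H W r c 1 dirsB F) := by
    rw [hA]
    exact (hdperm.filterMap g).trans hBperm.symm
  have hcnt := hperm.count_eq '#'
  have hmem : ∀ (l1 l2 : List Char), l1.Perm l2 → l1.contains '#' = l2.contains '#' := by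
    intro l1 l2 hp
    rw [Bool.eq_iff_iff]
    simp only [List.contains_iff_mem]
    exact hp.mem_iff
  rw [hcnt, hmem _ _ hperm]
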